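-- pv_equiv track=rewrite | github.com/adapdoaosdaoda/asdas-cogs | polling/calendar_renderer.py | _sort_events_for_display
-- ===== SOURCE A (Python) =====
-- from typing import Dict, List, Tuple
--
-- def _sort_events_for_display(events_in_cell: List, current_time: str) -> List:
--     """Sort events for display based on priority
--
--     Rules:
--     - Party always appears on top in combo cells
--     - Other events sorted by priority
--
--     Args:
--         events_in_cell: List of (priority, event_name, slot_num, start_time, duration)
--         current_time: Current time slot being displayed
--
--     Returns:
--         Sorted list of events with Party always first
--     """
--     # Separate Party and other events
--     party_events = [e for e in events_in_cell if e[1] == "Party"]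
--     other_events = [e for e in events_in_cell if e[1] != "Party"]
--
--     if not other_events:
--         return party_events
--     if not party_events:
--         # Sort by priority (first element of tuple)
--         return sorted(other_events, key=lambda x: x[0], reverse=True)
--
--     # Party always goes first, then other events sorted by priority
--     other_sorted = sorted(other_events, key=lambda x: x[0], reverse=True)
--     return party_events + other_sorted
-- ===== SOURCE B (Python) =====
-- def _sort_events_for_display(events_in_cell, current_time):
--     """Single stable sort: Party events keep input order via a constant key,
--     others follow sorted by descending priority."""
--     return sorted(events_in_cell,
--                   key=lambda e: (0, 0) if e[1] == "Party" else (1, -e[0]))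
-- ===== Notes on version B (the rewrite author's own statement) =====
-- stated objective: simpler
-- what changed: Replaces the two partition comprehensions, the two empty-group early returns and the list concatenation with one stable sort over a compound key ((0,0) for Party, (1,-priority) otherwise), which pins Party events first in input order and orders the rest by descending priority.
import Mathlib
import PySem

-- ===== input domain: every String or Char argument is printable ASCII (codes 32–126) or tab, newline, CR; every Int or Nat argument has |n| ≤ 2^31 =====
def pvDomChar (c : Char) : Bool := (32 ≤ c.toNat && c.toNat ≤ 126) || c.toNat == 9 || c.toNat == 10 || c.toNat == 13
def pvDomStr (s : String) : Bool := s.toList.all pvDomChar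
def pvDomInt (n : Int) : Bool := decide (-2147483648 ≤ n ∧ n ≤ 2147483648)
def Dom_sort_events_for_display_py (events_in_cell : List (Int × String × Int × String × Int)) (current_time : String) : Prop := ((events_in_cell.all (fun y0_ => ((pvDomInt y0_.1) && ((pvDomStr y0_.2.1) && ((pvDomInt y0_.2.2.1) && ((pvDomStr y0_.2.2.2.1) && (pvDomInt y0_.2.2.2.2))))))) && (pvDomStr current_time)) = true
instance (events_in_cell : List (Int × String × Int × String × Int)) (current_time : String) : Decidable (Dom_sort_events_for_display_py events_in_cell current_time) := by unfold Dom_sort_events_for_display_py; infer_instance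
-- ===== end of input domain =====

-- B replaces A's partition-into-two-lists + branch-on-empty + sort + concatenation by one
-- stable sort with a compound key; same cost, simpler decomposition (objective: simpler).

-- ===== PORT A =====
def sort_events_for_display_py (events_in_cell : List (Int × String × Int × String × Int)) (current_time : String) : List (Int × String × Int × String × Int) :=
  let party_events := events_in_cell.filter (fun e => e.2.1 == "Party")
  let other_events := events_in_cell.filter (fun e => !(e.2.1 == "Party"))
  if other_events = [] then party_events
  else if party_events = [] then PySem.List.sorted other_events (fun x => x.1) true
  else
    let other_sorted := PySem.List.sorted other_events (fun x => x.1) true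
    party_events ++ other_sorted

-- ===== PORT B =====
-- key=lambda e: (0, 0) if e[1] == "Party" else (1, -e[0])  (tuple key → sorted2)
def sort_events_for_display_py_alt (events_in_cell : List (Int × String × Int × String × Int)) (current_time : String) : List (Int × String × Int × String × Int) :=
  PySem.List.sorted2 events_in_cell
    (fun e => if e.2.1 == "Party" then (0 : Int) else 1)
    (fun e => if e.2.1 == "Party" then (0 : Int) else -e.1)

-- ===== PRECONDITION & SPEC =====
def Spec_sort_events_for_display_py (events_in_cell : List (Int × String × Int × String × Int)) (current_time : String) (out : List (Int × String × Int × String × Int)) : Prop := out = sort_events_for_display_py_alt events_in_cell current_time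
instance (events_in_cell : List (Int × String × Int × String × Int)) (current_time : String) (out : List (Int × String × Int × String × Int)) : Decidable (Spec_sort_events_for_display_py events_in_cell current_time out) := by unfold Spec_sort_events_for_display_py; infer_instance

-- ===== CLAIM (what is proved, stated in full; the proofs are below) =====
def Claim_equal_sort_events_for_display_py : Prop := ∀ (events_in_cell : List (Int × String × Int × String × Int)) (current_time : String), Dom_sort_events_for_display_py events_in_cell current_time → Spec_sort_events_for_display_py events_in_cell current_time (sort_events_for_display_py events_in_cell current_time)

-- ===== LEMMAS AND PROOFS =====

-- insertBy with the same decisions on every element of the list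
theorem insertBy_congr {α : Type} (before bo : α → α → Bool) (x : α) :
    ∀ (B : List α), (∀ b ∈ B, before x b = bo x b) →
      PySem.List.insertBy before x B = PySem.List.insertBy bo x B := by
  intro B
  induction B with
  | nil => intro _; rfl
  | cons b B ih =>
    intro h
    simp only [PySem.List.insertBy, h b (by simp)]
    by_cases hb : bo x b = true
    · simp [hb]
    · simp only [hb, Bool.false_eq_true, if_false]
      rw [ih (fun y hy => h y (by simp [hy]))]

-- Inserting into a list  A ++ B  where every element of A satisfies P and none of B does,
-- under a comparison that puts all P-elements strictly before all non-P elements and never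
-- reorders two P-elements.
theorem insertBy_split {α : Type} (P : α → Bool) (before bo : α → α → Bool)
    (hPP : ∀ a b, P a = true → P b = true → before a b = false)
    (hPN : ∀ a b, P a = true → P b = false → before a b = true)
    (hNP : ∀ a b, P a = false → P b = true → before a b = false)
    (hNN : ∀ a b, P a = false → P b = false → before a b = bo a b)
    (x : α) :
    ∀ (A B : List α), (∀ a ∈ A, P a = true) → (∀ b ∈ B, P b = false) →
      PySem.List.insertBy before x (A ++ B) =
        if P x then (A ++ [x]) ++ B else A ++ PySem.List.insertBy bo x B := by
  intro A
  induction A with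
  | nil =>
    intro B _ hB
    by_cases hx : P x = true
    · rw [if_pos hx]
      cases B with
      | nil => rfl
      | cons b B => simp [PySem.List.insertBy, hPN x b hx (hB b (by simp))]
    · rw [if_neg hx]
      exact insertBy_congr before bo x B
        (fun b hb => hNN x b (by simpa using hx) (hB b hb))
  | cons a A ih =>
    intro B hA hB
    have ha : P a = true := hA a (by simp)
    have hstep : before x a = false := by
      by_cases hx : P x = true
      · exact hPP x a hx ha
      · exact hNP x a (by simpa using hx) ha
    simp only [List.cons_append, PySem.List.insertBy, hstep, Bool.false_eq_true, if_false]
    rw [ih B (fun y hy => hA y (by simp [hy])) hB]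
    by_cases hx : P x = true <;> simp [hx]

-- The whole insertion-sort loop over xs, started from A ++ B, keeps the P-part in arrival
-- order at the front and runs the bo-insertion sort on the non-P part.
theorem foldl_insertBy_split {α : Type} (P : α → Bool) (before bo : α → α → Bool)
    (hPP : ∀ a b, P a = true → P b = true → before a b = false)
    (hPN : ∀ a b, P a = true → P b = false → before a b = true)
    (hNP : ∀ a b, P a = false → P b = true → before a b = false)
    (hNN : ∀ a b, P a = false → P b = false → before a b = bo a b) :
    ∀ (xs A B : List α), (∀ a ∈ A, P a = true) → (∀ b ∈ B, P b = false) →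
      xs.foldl (fun acc x => PySem.List.insertBy before x acc) (A ++ B) =
        (A ++ xs.filter P) ++
          (xs.filter (fun x => !P x)).foldl (fun acc x => PySem.List.insertBy bo x acc) B := by
  intro xs
  induction xs with
  | nil => intro A B _ _; simp
  | cons x xs ih =>
    intro A B hA hB
    simp only [List.foldl_cons]
    rw [insertBy_split P before bo hPP hPN hNP hNN x A B hA hB]
    by_cases hx : P x = true
    case neg =>
      rw [if_neg hx]
      replace hx : P x = false := by simpa using hx
      rw [ih A (PySem.List.insertBy bo x B)
          hA
          (fun y hy => by
            rcases (PySem.List.mem_insertBy bo x y B).mp hy with h | h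
            · simpa [h] using hx
            · exact hB y h)]
      simp [List.filter_cons, hx]
    case pos =>
      rw [if_pos hx]
      rw [show A ++ [x] ++ B = (A ++ [x]) ++ B from rfl,
          ih (A ++ [x]) B
          (fun y hy => by
            rcases List.mem_append.mp hy with h | h
            · exact hA y h
            · simpa [List.mem_singleton.mp h] using hx)
          hB]
      simp [List.filter_cons, hx]

-- ===== VERDICT (by name: the statement is the Claim_ definition above) =====
theorem sort_events_for_display_py_spec : Claim_equal_sort_events_for_display_py := by
  intro xs ct _
  unfold Spec_sort_events_for_display_py
  have key := foldl_insertBy_split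
    (fun (e : Int × String × Int × String × Int) => e.2.1 == "Party")
    (fun a b =>
      decide ((if a.2.1 == "Party" then (0 : Int) else 1) < (if b.2.1 == "Party" then (0 : Int) else 1)) ||
      (!decide ((if b.2.1 == "Party" then (0 : Int) else 1) < (if a.2.1 == "Party" then (0 : Int) else 1)) &&
        decide ((if a.2.1 == "Party" then (0 : Int) else -a.1) < (if b.2.1 == "Party" then (0 : Int) else -b.1))))
    (fun a b => decide (b.1 < a.1))
    (by intro a b ha hb; simp [ha, hb])
    (by intro a b ha hb; simp [ha, hb])
    (by intro a b ha hb; simp [ha, hb])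
    (by intro a b ha hb; simp [ha, hb])
    xs [] [] (by simp) (by simp)
  simp only [List.nil_append] at key
  rw [show sort_events_for_display_py_alt xs ct = _ from key]
  unfold sort_events_for_display_py
  have hs : PySem.List.sorted
        (xs.filter (fun x : Int × String × Int × String × Int => !(x.2.1 == "Party")))
        (fun x => x.1) true
      = (xs.filter (fun x : Int × String × Int × String × Int => !(x.2.1 == "Party"))).foldl
          (fun acc x => PySem.List.insertBy (fun a b => decide (b.1 < a.1)) x acc) [] := rfl
  dsimp only
  split_ifs with h1 h2
  · simp [h1]
  · simp [h2, ← hs]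
  · rw [← hs]
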